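-- pv_equiv track=rewrite | github.com/Orking20/Desafio-de-adviento-2025 | Dia_1/dial.py | girar_R
-- ===== SOURCE A (Python) =====
-- def girar_R(estado_inicial, cant_movimientos):
--     pos_actual = estado_inicial
--     contador = 0
--
--     for i in range(cant_movimientos):
--         pos_actual += 1
--
--         if pos_actual == 100:
--             pos_actual = 0
--             contador += 1
--
--     if pos_actual == 0:
--         estado_final = 0
--     else:
--         estado_final = (estado_inicial + cant_movimientos) % 100
--
--     return estado_final, contador
-- ===== SOURCE B (Python) =====
-- def girar_R(estado_inicial, cant_movimientos):
--     # O(1) closed form instead of A's O(cant_movimientos) step-by-step loop.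
--     total = estado_inicial + cant_movimientos
--     contador = total // 100 if estado_inicial < 100 <= total else 0
--     return total % 100, contador
-- ===== Notes on version B (the rewrite author's own statement) =====
-- stated objective: faster
-- what changed: Replaces the step-by-step simulation loop with direct div/mod arithmetic on estado_inicial+cant_movimientos (wrap count = floor(total/100) when the dial starts below 100 and crosses it).
-- intended difference: When estado_inicial = 0 and cant_movimientos is negative and not a multiple of 100, A's 'if pos==0' special case reports final position 0, while B reports the backward-rotated position (estado_inicial+cant_movimientos) mod 100 that A itself reports for every other start, which is the intended value; the wrap count is 0 for both. — e.g. on girar_R(0, -5): A returns (0, 0), B returns (95, 0)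
import Mathlib
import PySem

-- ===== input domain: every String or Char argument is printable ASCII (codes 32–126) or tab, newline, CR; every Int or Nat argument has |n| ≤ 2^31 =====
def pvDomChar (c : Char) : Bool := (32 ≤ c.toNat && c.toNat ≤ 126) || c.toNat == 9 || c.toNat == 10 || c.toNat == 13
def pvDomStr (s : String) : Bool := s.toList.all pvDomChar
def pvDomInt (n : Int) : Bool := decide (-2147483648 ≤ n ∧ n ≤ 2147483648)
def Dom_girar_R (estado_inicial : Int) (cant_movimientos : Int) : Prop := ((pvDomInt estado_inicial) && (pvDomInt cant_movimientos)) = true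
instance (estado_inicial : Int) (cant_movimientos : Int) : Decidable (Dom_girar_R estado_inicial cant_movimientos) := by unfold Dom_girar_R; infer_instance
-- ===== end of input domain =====

-- B replaces A's O(n) step-by-step dial simulation by O(1) div/mod arithmetic; return values only (no mutation).

-- ===== PORT A =====
def girar_R (estado_inicial : Int) (cant_movimientos : Int) : Int × Int :=
  let st := (PySem.List.pyRange 0 cant_movimientos 1).foldl
    (fun (s : Int × Int) _ =>
      let pos := s.1 + 1
      if pos = 100 then (0, s.2 + 1) else (pos, s.2))
    (estado_inicial, 0)
  let estado_final := if st.1 = 0 then (0 : Int) else PySem.Int.mod (estado_inicial + cant_movimientos) 100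
  (estado_final, st.2)

-- ===== PORT B =====
def girar_R_alt (estado_inicial : Int) (cant_movimientos : Int) : Int × Int :=
  let total := estado_inicial + cant_movimientos
  let contador := if estado_inicial < 100 ∧ 100 ≤ total then PySem.Int.floordiv total 100 else 0
  (PySem.Int.mod total 100, contador)

-- ===== PRECONDITION & SPEC =====
-- When estado_inicial = 0 and cant_movimientos is negative and not a multiple of 100, A's
-- 'if pos==0' special case reports final position 0, while B reports the backward-rotated position
-- (estado_inicial+cant_movimientos) mod 100 that A itself reports for every other start — the
-- intended value; the wrap count is 0 for both.
def D_girar_R (estado_inicial : Int) (cant_movimientos : Int) : Prop :=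
  estado_inicial = 0 ∧ cant_movimientos < 0 ∧ ¬ (100 ∣ cant_movimientos)
instance (estado_inicial : Int) (cant_movimientos : Int) : Decidable (D_girar_R estado_inicial cant_movimientos) := by unfold D_girar_R; infer_instance

def Spec_girar_R (estado_inicial : Int) (cant_movimientos : Int) (out : Int × Int) : Prop :=
  ¬ D_girar_R estado_inicial cant_movimientos → out = girar_R_alt estado_inicial cant_movimientos
instance (estado_inicial : Int) (cant_movimientos : Int) (out : Int × Int) : Decidable (Spec_girar_R estado_inicial cant_movimientos out) := by unfold Spec_girar_R; infer_instance

def pvDiffWitness_girar_R : Int × Int := (0, -5)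
def pvDiffWitnessOut_girar_R : (Int × Int) × (Int × Int) := ((0, 0), (95, 0))

-- ===== CLAIM (what is proved, stated in full; the proofs are below) =====
def Claim_unchanged_girar_R : Prop := ∀ (estado_inicial : Int) (cant_movimientos : Int), Dom_girar_R estado_inicial cant_movimientos → Spec_girar_R estado_inicial cant_movimientos (girar_R estado_inicial cant_movimientos)
def Claim_changed_girar_R : Prop := Dom_girar_R (pvDiffWitness_girar_R.1) (pvDiffWitness_girar_R.2) ∧ D_girar_R (pvDiffWitness_girar_R.1) (pvDiffWitness_girar_R.2) ∧ girar_R (pvDiffWitness_girar_R.1) (pvDiffWitness_girar_R.2) = pvDiffWitnessOut_girar_R.1 ∧ girar_R_alt (pvDiffWitness_girar_R.1) (pvDiffWitness_girar_R.2) = pvDiffWitnessOut_girar_R.2 ∧ pvDiffWitnessOut_girar_R.1 ≠ pvDiffWitnessOut_girar_R.2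
def Claim_exact_girar_R : Prop := ∀ (estado_inicial : Int) (cant_movimientos : Int), Dom_girar_R estado_inicial cant_movimientos → D_girar_R estado_inicial cant_movimientos → girar_R estado_inicial cant_movimientos ≠ girar_R_alt estado_inicial cant_movimientos

-- ===== LEMMAS AND PROOFS =====

-- Characterisation of A's simulation loop: starting from position p it either never hits 100
-- (p ≥ 100 or p + steps < 100) and just advances, or it wraps floor((p+steps)/100) times.
theorem girar_loop_char (l : List Int) (p c : Int) :
    l.foldl (fun (s : Int × Int) _ =>
        let pos := s.1 + 1
        if pos = 100 then (0, s.2 + 1) else (pos, s.2)) (p, c)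
      = if p < 100 ∧ 100 ≤ p + l.length then
          (PySem.Int.mod (p + l.length) 100, c + PySem.Int.floordiv (p + l.length) 100)
        else (p + l.length, c) := by
  have hm : ∀ a : Int, PySem.Int.mod a 100 = a % 100 :=
    fun a => PySem.Int.mod_eq_emod_of_pos (by norm_num)
  have hd : ∀ a : Int, PySem.Int.floordiv a 100 = a / 100 :=
    fun a => PySem.Int.floordiv_eq_ediv_of_pos (by norm_num)
  induction l generalizing p c with
  | nil =>
    simp only [List.foldl_nil, List.length_nil, Nat.cast_zero, add_zero]
    rw [if_neg (by omega)]
  | cons x l ih =>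
    simp only [List.foldl_cons, List.length_cons]
    by_cases h : p + 1 = 100
    · simp only [h, if_pos]
      rw [ih]
      simp only [hm, hd]
      push_cast
      split_ifs with h1 h2 h2 <;>
        (try simp only [true_and, zero_add] at h1 h2 ⊢) <;>
        simp only [Prod.mk.injEq] <;> constructor <;> first | trivial | omega
    · simp only [if_neg h]
      rw [ih]
      simp only [hm, hd]
      push_cast
      split_ifs with h1 h2 h2 <;>
        simp only [Prod.mk.injEq] <;> constructor <;> first | trivial | omega

-- ===== VERDICT (by name: the statement is the Claim_ definition above) =====
theorem girar_R_spec : Claim_unchanged_girar_R := by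
  intro e c _ hD
  show girar_R e c = girar_R_alt e c
  have hm : ∀ a : Int, PySem.Int.mod a 100 = a % 100 :=
    fun a => PySem.Int.mod_eq_emod_of_pos (by norm_num)
  have hd : ∀ a : Int, PySem.Int.floordiv a 100 = a / 100 :=
    fun a => PySem.Int.floordiv_eq_ediv_of_pos (by norm_num)
  have hndvd : ¬ (e = 0 ∧ c < 0 ∧ ¬ (100 ∣ c)) := hD
  simp only [girar_R, girar_R_alt]
  rw [girar_loop_char, PySem.List.length_pyRange_one]
  simp only [hm, hd, sub_zero]
  refine Prod.ext ?_ ?_ <;>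
    simp only [apply_ite Prod.fst, apply_ite Prod.snd] <;>
    split_ifs <;> simp_all <;> omega

theorem girar_R_changed : Claim_changed_girar_R := by
  unfold Claim_changed_girar_R; decide

theorem girar_R_tight : Claim_exact_girar_R := by
  intro e c _ hD
  obtain ⟨he, hc, hdvd⟩ := hD
  subst he
  simp only [girar_R, girar_R_alt]
  rw [PySem.List.pyRange_one_eq_nil (by omega)]
  simp only [List.foldl_nil]
  intro hEq
  have h1 := congrArg Prod.fst hEq
  have hmod : PySem.Int.mod (0 + c) 100 ≠ 0 := by
    rw [Ne, PySem.Int.mod_eq_zero_iff_dvd]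
    simpa using hdvd
  simp only [zero_add] at h1
  rw [zero_add] at hmod
  exact hmod h1.symm
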